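-- pv_equiv track=rewrite | github.com/eunsu-park/study-hub | examples/Algorithm/python/27_game_theory.py | euclid_game
-- ===== SOURCE A (Python) =====
-- def euclid_game(a: int, b: int) -> bool:
--     """
--     Euclid's Game: subtract a multiple of the smaller number from the larger
--     The player who makes 0 wins
--     Returns: True if first player wins
--     """
--     if a < b:
--         a, b = b, a
--
--     if b == 0:
--         return False  # Already over
--
--     # Recursive analysis
--     turn = True  # True: first player's turn
--     while b > 0:
--         if a >= 2 * b or a == b:
--             return turn
--         a, b = b, a - b
--         turn = not turn
--
--     return not turn
-- ===== SOURCE B (Python) =====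
-- def euclid_game(a: int, b: int) -> bool:
--     hi, lo = max(a, b), min(a, b)
--     if lo <= 0:
--         return False
--     if hi == lo or hi >= 2 * lo:
--         return True
--     return not euclid_game(lo, hi - lo)
-- ===== Notes on version B (the rewrite author's own statement) =====
-- stated objective: simpler
-- what changed: Replaces the explicit while-loop with a mutable turn flag by a short recursion in which player alternation is encoded as negation of the recursive result.
import Mathlib
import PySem

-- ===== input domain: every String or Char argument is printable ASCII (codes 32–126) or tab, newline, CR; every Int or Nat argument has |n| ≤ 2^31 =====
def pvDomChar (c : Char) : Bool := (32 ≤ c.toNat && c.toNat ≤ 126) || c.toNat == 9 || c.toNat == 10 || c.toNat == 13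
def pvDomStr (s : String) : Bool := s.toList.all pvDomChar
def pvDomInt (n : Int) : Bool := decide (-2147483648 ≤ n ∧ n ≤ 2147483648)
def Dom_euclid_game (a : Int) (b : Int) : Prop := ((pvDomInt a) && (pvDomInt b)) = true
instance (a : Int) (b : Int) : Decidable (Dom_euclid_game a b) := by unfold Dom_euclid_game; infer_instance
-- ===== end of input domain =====

-- B replaces A's while-loop with a turn flag by a recursion whose negation encodes player alternation (simpler decomposition, same cost).


-- ===== PORT A =====
-- the `while b > 0` loop of A, carrying the same (a, b, turn) state; the Nat
-- argument is fuel for totality only (b strictly decreases, so fuel = b.toNat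
-- is always enough, and at fuel 0 we have b ≤ 0, the loop-exit `return not turn`)
def euclid_game_loop : Nat → Int → Int → Bool → Bool
  | 0, _, _, turn => !turn
  | n + 1, a, b, turn =>
    if 0 < b then
      if a ≥ 2 * b ∨ a = b then turn
      else euclid_game_loop n b (a - b) (!turn)
    else !turn

def euclid_game (a : Int) (b : Int) : Bool :=
  -- if a < b: a, b = b, a
  match (if a < b then (b, a) else (a, b)) with
  | (a, b) =>
    if b = 0 then false
    else euclid_game_loop b.toNat a b true

-- ===== PORT B =====
-- fuel for totality only: min strictly decreases, and at fuel 0 min a b ≤ 0, the `lo <= 0` branch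
def euclid_game_alt_go : Nat → Int → Int → Bool
  | 0, _, _ => false
  | n + 1, a, b =>
    let hi := max a b
    let lo := min a b
    if lo ≤ 0 then false
    else if hi = lo ∨ hi ≥ 2 * lo then true
    else !(euclid_game_alt_go n lo (hi - lo))

def euclid_game_alt (a : Int) (b : Int) : Bool :=
  euclid_game_alt_go (min a b).toNat a b

-- ===== PRECONDITION & SPEC =====
def Spec_euclid_game (a : Int) (b : Int) (out : Bool) : Prop := out = euclid_game_alt a b
instance (a : Int) (b : Int) (out : Bool) : Decidable (Spec_euclid_game a b out) := by unfold Spec_euclid_game; infer_instance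

-- ===== CLAIM (what is proved, stated in full; the proofs are below) =====
def Claim_equal_euclid_game : Prop := ∀ (a : Int) (b : Int), Dom_euclid_game a b → Spec_euclid_game a b (euclid_game a b)

-- ===== LEMMAS AND PROOFS =====
-- swapping the arguments swaps nothing: only max/min of them are used
lemma altGo_comm (n : ℕ) (a b : Int) : euclid_game_alt_go n a b = euclid_game_alt_go n b a := by
  cases n with
  | zero => rfl
  | succ n => simp only [euclid_game_alt_go, max_comm, min_comm]

-- On ordered positive state, A's loop equals B's recursion, the turn flag matching B's negation.
lemma loop_alt (n : ℕ) : ∀ a b : Int, ∀ turn : Bool, b.toNat ≤ n → 0 < b → b ≤ a →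
    euclid_game_loop n a b turn = cond (euclid_game_alt_go n a b) turn (!turn) := by
  induction n with
  | zero => intro a b turn hle hb _; omega
  | succ n ih =>
    intro a b turn hle hb hba
    simp only [euclid_game_loop, euclid_game_alt_go]
    rw [max_eq_left hba, min_eq_right hba]
    by_cases hwin : a ≥ 2 * b ∨ a = b
    · have hwin' : a = b ∨ a ≥ 2 * b := hwin.symm
      rw [if_pos hb, if_pos hwin, if_neg (not_le.mpr hb), if_pos hwin']
      rfl
    · have h1 : 0 < a - b := by omega
      have h2 : a - b ≤ b := by omega
      have hwin' : ¬ (a = b ∨ a ≥ 2 * b) := by omega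
      rw [if_pos hb, if_neg hwin, if_neg (not_le.mpr hb), if_neg hwin',
        ih b (a - b) (!turn) (by omega) h1 h2]
      cases euclid_game_alt_go n b (a - b) <;> cases turn <;> rfl

-- ===== VERDICT (by name: the statement is the Claim_ definition above) =====
theorem euclid_game_spec : Claim_equal_euclid_game := by
  intro a b _
  unfold Spec_euclid_game euclid_game euclid_game_alt
  rcases lt_or_ge a b with h | h
  · -- swap: the loop state starts as (b, a)
    rw [if_pos h]
    show (if a = 0 then false else euclid_game_loop a.toNat b a true)
      = euclid_game_alt_go (min a b).toNat a b
    have hmin : min a b = a := min_eq_left h.le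
    rw [hmin, altGo_comm]
    by_cases ha0 : 0 < a
    · rw [if_neg (by omega : ¬ a = 0),
        loop_alt a.toNat b a true le_rfl ha0 h.le]
      cases euclid_game_alt_go a.toNat b a <;> rfl
    · -- a ≤ 0: the loop body never runs and B's `lo <= 0` branch fires (fuel is 0)
      have : a.toNat = 0 := by omega
      rw [this]
      by_cases ha : a = 0
      · rw [if_pos ha]; rfl
      · rw [if_neg ha]; rfl
  · -- no swap: the loop state stays (a, b)
    rw [if_neg (not_lt.mpr h)]
    show (if b = 0 then false else euclid_game_loop b.toNat a b true)
      = euclid_game_alt_go (min a b).toNat a b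
    have hmin : min a b = b := min_eq_right h
    rw [hmin]
    by_cases hb0 : 0 < b
    · rw [if_neg (by omega : ¬ b = 0),
        loop_alt b.toNat a b true le_rfl hb0 h]
      cases euclid_game_alt_go b.toNat a b <;> rfl
    · have : b.toNat = 0 := by omega
      rw [this]
      by_cases hb : b = 0
      · rw [if_pos hb]; rfl
      · rw [if_neg hb]; rfl
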